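-- pv_equiv track=rewrite | github.com/PostHog/posthog | .conflict-side-0/posthog/heatmaps/heatmaps_api.py | validate_url_pattern
-- ===== SOURCE A (Python) =====
-- def validate_url_pattern(value: str | None) -> str | None:
--     if value is None:
--         return None
--
--     validated_value = value
--
--     # we insist on the pattern being anchored
--     if not value.startswith("^"):
--         validated_value = f"^{value}"
--     if not value.endswith("$"):
--         validated_value = f"{validated_value}$"
--
--     # KLUDGE: we allow API callers to send something that isn't really `re2` syntax used in match()
--     # KLUDGE: so if it has * but not .* then we expect at least one character to match, so we use .+ instead
--     # KLUDGE: this means we don't support valid regex since we can't support matching aaaaa with a*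
--     # KLUDGE: but you could send a+ and it would match aaaaa
--     validated_value = "".join(
--         [
--             f".+" if c == "*" and i > 0 and validated_value[i - 1] != "." else c
--             for i, c in enumerate(validated_value)
--         ]
--     )
--
--     return validated_value
-- ===== SOURCE B (Python) =====
-- def validate_url_pattern(value):
--     if value is None:
--         return None
--     anchored = ("" if value.startswith("^") else "^") + value + ("" if value.endswith("$") else "$")
--     parts = anchored.split("*")
--     pieces = [parts[0]]
--     for prev, part in zip(parts, parts[1:]):
--         pieces.append("*" if prev.endswith(".") else ".+")
--         pieces.append(part)
--     return "".join(pieces)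
-- ===== Notes on version B (the rewrite author's own statement) =====
-- stated objective: faster
-- what changed: A rebuilds the anchored string character by character with an enumerate comprehension that indexes back at i-1; B splits the anchored string on the star character and rejoins the parts, choosing the replacement per boundary from whether the preceding part ends with a dot, so the per-character Python-level loop is replaced by C-level str.split/str.join.
import Mathlib
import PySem

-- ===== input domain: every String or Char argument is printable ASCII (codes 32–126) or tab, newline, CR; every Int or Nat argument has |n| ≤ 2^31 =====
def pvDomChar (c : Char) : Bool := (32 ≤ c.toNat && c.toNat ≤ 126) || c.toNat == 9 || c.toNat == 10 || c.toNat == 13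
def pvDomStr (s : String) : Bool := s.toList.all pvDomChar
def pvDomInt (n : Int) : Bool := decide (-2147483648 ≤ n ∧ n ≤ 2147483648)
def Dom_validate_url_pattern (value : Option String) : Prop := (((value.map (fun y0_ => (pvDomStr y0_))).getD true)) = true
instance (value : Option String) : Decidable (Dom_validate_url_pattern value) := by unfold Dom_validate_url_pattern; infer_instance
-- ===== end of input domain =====

-- B replaces A's per-character enumerate comprehension (with index-back at i-1) by a
-- split-on-star / rejoin algorithm deciding each boundary from the preceding part
-- (objective: faster — a timing run measured B faster at the largest size).

-- ===== PORT A =====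
-- literal port of A: anchoring guards, then ''.join of a list comprehension over
-- enumerate(validated_value) that indexes back into validated_value at i-1.
def validate_url_pattern (value : Option String) : Option String :=
  match value with
  | none => none
  | some v =>
    let vv0 := v.toList
    let vv1 := if ¬ PySem.Chars.startswith vv0 ['^'] then '^' :: vv0 else vv0
    let vv2 := if ¬ PySem.Chars.endswith vv0 ['$'] then vv1 ++ ['$'] else vv1
    let pieces := (PySem.List.enumerate vv2 0).map (fun ic =>
      if ic.2 = '*' ∧ 0 < ic.1 ∧ PySem.List.pyGet? vv2 (ic.1 - 1) ≠ some '.' then ['.', '+'] else [ic.2])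
    some (String.ofList (PySem.Chars.join [] pieces))

-- ===== PORT B =====
-- port of Source B: anchor in one concatenation, split on '*', then rejoin the parts,
-- emitting '*' or '.+' at each boundary according to the preceding part's last character;
-- str.split("*") is ported as List.splitOn '*' (same semantics for a one-character separator).
def validate_url_pattern_alt (value : Option String) : Option String :=
  match value with
  | none => none
  | some v =>
    let anchored := (if PySem.Chars.startswith v.toList ['^'] then [] else ['^']) ++ v.toList
      ++ (if PySem.Chars.endswith v.toList ['$'] then [] else ['$'])
    let parts := anchored.splitOn '*'
    let pieces : List (List Char) :=
      match parts with
      | [] => []  -- unreachable: split never returns an empty list (parts[0] in Source B)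
      | p0 :: rest => p0 :: (List.zip (p0 :: rest) rest).flatMap (fun pr =>
          [(if PySem.Chars.endswith pr.1 ['.'] then ['*'] else ['.', '+']), pr.2])
    some (String.ofList pieces.flatten)

-- ===== PRECONDITION & SPEC =====
def Spec_validate_url_pattern (value : Option String) (out : Option String) : Prop := out = validate_url_pattern_alt value
instance (value : Option String) (out : Option String) : Decidable (Spec_validate_url_pattern value out) := by unfold Spec_validate_url_pattern; infer_instance

-- ===== CLAIM (what is proved, stated in full; the proofs are below) =====
def Claim_equal_validate_url_pattern : Prop := ∀ (value : Option String), Dom_validate_url_pattern value → Spec_validate_url_pattern value (validate_url_pattern value)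

-- ===== LEMMAS AND PROOFS =====

-- proof-only intermediary: the one-pass transform carrying the previous character
def pvSubGo (prev : List Char) (cs : List Char) : List Char :=
  match cs with
  | [] => []
  | c :: rest => (if c = '*' ∧ prev ≠ ['.'] then ['.', '+'] else [c]) ++ pvSubGo [c] rest

-- proof-only intermediary: B's join, as direct recursion over consecutive part pairs
def pvBJ : List (List Char) → List Char
  | [] => []
  | [p] => p
  | p :: q :: rest =>
      p ++ (if PySem.Chars.endswith p ['.'] then ['*'] else ['.', '+']) ++ pvBJ (q :: rest)

lemma pv_join_nil_flatten (pieces : List (List Char)) :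
    PySem.Chars.join [] pieces = pieces.flatten := by
  induction pieces with
  | nil => simp [PySem.Chars.join_nil]
  | cons a t ih =>
    cases t with
    | nil => simp [PySem.Chars.join_singleton]
    | cons b u => simp [PySem.Chars.join_cons_cons, ih]

-- A-side invariant: A's comprehension restricted to the suffix after a nonempty prefix equals
-- the one-pass loop started with the last character of that prefix.
lemma pv_trans_eq (full : List Char) (pre cs : List Char) (hpre : pre ≠ [])
    (hfull : pre ++ cs = full) :
    ((PySem.List.enumerate cs (pre.length : Int)).map (fun ic =>
        if ic.2 = '*' ∧ 0 < ic.1 ∧ PySem.List.pyGet? full (ic.1 - 1) ≠ some '.' then ['.', '+'] else [ic.2])).flatten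
      = pvSubGo [pre.getLast hpre] cs := by
  induction cs generalizing pre with
  | nil => simp [PySem.List.enumerate_nil, pvSubGo]
  | cons c rest ih =>
    obtain ⟨pre', l, rfl⟩ : ∃ pre' l, pre = pre' ++ [l] := by
      rcases List.eq_nil_or_concat pre with h | ⟨pre', l, h⟩
      · exact absurd h hpre
      · exact ⟨pre', l, by simpa using h⟩
    have hget : PySem.List.pyGet? full (((pre' ++ [l]).length : Int) - 1) = some l := by
      have : ((pre' ++ [l]).length : Int) - 1 = (pre'.length : Int) := by
        simp [List.length_append]
      rw [this, ← hfull]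
      have : (pre' ++ [l]) ++ c :: rest = pre' ++ l :: (c :: rest) := by simp
      rw [this]
      exact PySem.List.pyGet?_append_length pre' (c :: rest) l
    rw [PySem.List.enumerate_cons, List.map_cons, List.flatten_cons]
    have hrec := ih (pre := (pre' ++ [l]) ++ [c]) (by simp) (by simpa using hfull)
    have hlen : (((pre' ++ [l]) ++ [c]).length : Int) = ((pre' ++ [l]).length : Int) + 1 := by
      simp
      omega
    rw [hlen] at hrec
    have hlast : ((pre' ++ [l]) ++ [c]).getLast (by simp) = c := by simp
    rw [hlast] at hrec
    rw [hrec, pvSubGo]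
    congr 1
    have hpos : (0 : Int) < ((pre' ++ [l]).length : Int) := by
      simp
    rw [hget]
    by_cases hc : c = '*'
    · by_cases hl : l = '.'
      · simp [hc, hl]
      · simp [hc, hl, Ne]
    · simp [hc]

-- both anchorings produce the same list, and it starts with '^'
lemma pv_anchor_eq (v : List Char) :
    (if ¬ PySem.Chars.endswith v ['$'] then
        (if ¬ PySem.Chars.startswith v ['^'] then '^' :: v else v) ++ ['$']
      else (if ¬ PySem.Chars.startswith v ['^'] then '^' :: v else v))
    = (if PySem.Chars.startswith v ['^'] then [] else ['^']) ++ v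
        ++ (if PySem.Chars.endswith v ['$'] then [] else ['$']) := by
  by_cases hs : PySem.Chars.startswith v ['^'] = true <;>
    by_cases he : PySem.Chars.endswith v ['$'] = true <;> simp [hs, he]

lemma pv_anchor_head (v : List Char) :
    ∃ t, (if PySem.Chars.startswith v ['^'] then [] else ['^']) ++ v
        ++ (if PySem.Chars.endswith v ['$'] then [] else ['$']) = '^' :: t := by
  by_cases hs : PySem.Chars.startswith v ['^'] = true
  · obtain ⟨t, rfl⟩ := (PySem.Chars.startswith_iff v ['^']).mp hs
    exact ⟨t ++ (if PySem.Chars.endswith ('^' :: t) ['$'] then [] else ['$']),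
      by simp [show PySem.Chars.startswith ('^' :: t) ['^'] = true from by simpa using hs]⟩
  · exact ⟨v ++ (if PySem.Chars.endswith v ['$'] then [] else ['$']), by simp [hs]⟩

-- B's flatMap-over-zip pieces compute pvBJ
lemma pvBJ_single (p : List Char) : pvBJ [p] = p := rfl

lemma pvBJ_cons_cons (p q : List Char) (rest : List (List Char)) :
    pvBJ (p :: q :: rest)
      = p ++ (if PySem.Chars.endswith p ['.'] then ['*'] else ['.', '+']) ++ pvBJ (q :: rest) := rfl

lemma pv_endswith_dot (xs : List Char) (x : Char) :
    PySem.Chars.endswith (xs ++ [x]) ['.'] = decide (x = '.') := by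
  by_cases hx : x = '.'
  · subst hx
    have h : PySem.Chars.endswith (xs ++ ['.']) ['.'] = true :=
      (PySem.Chars.endswith_iff _ _).mpr ⟨xs, by simp⟩
    simp [h]
  · have h : ¬ (['.'] <:+ xs ++ [x]) := by
      rintro ⟨t, ht⟩
      have h2 := congrArg List.getLast? ht
      simp at h2
      exact hx h2.symm
    have h2 : PySem.Chars.endswith (xs ++ [x]) ['.'] = false := by
      rw [← Bool.not_eq_true, PySem.Chars.endswith_iff]; exact h
    simp [h2, hx]

lemma pv_pieces_eq_bj (p0 : List Char) (rest : List (List Char)) :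
    (p0 :: (List.zip (p0 :: rest) rest).flatMap (fun pr =>
        [(if PySem.Chars.endswith pr.1 ['.'] then ['*'] else ['.', '+']), pr.2])).flatten
      = pvBJ (p0 :: rest) := by
  induction rest generalizing p0 with
  | nil => simp [pvBJ_single]
  | cons q rs ih =>
    have h := ih q
    simp only [List.zip_cons_cons, List.flatMap_cons, List.flatten_cons] at h ⊢
    rw [pvBJ_cons_cons, ← h]
    simp

lemma pv_splitOn_cons (c : Char) (cs : List Char) :
    List.splitOn '*' (c :: cs) =
      if c = '*' then [] :: List.splitOn '*' cs
      else (List.splitOn '*' cs).modifyHead (c :: ·) := by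
  rcases eq_or_ne c '*' with h | h <;> simp [List.splitOn, List.splitOnP_cons, h]

lemma pv_splitOn_ne_nil (cs : List Char) : List.splitOn '*' cs ≠ [] := by
  induction cs with
  | nil => simp [List.splitOn]
  | cons c rest ih =>
    rw [pv_splitOn_cons]
    split_ifs
    · simp
    · cases h : List.splitOn '*' rest with
      | nil => exact absurd h ih
      | cons a t => simp

-- prepending '*' to the head part does not change the join (the boundary test is unaffected)
lemma pv_bj_star (q : List Char) (rest : List (List Char)) :
    pvBJ (('*' :: q) :: rest) = '*' :: pvBJ (q :: rest) := by
  cases rest with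
  | nil => simp [pvBJ_single]
  | cons r rs =>
    rw [pvBJ_cons_cons, pvBJ_cons_cons]
    have h : PySem.Chars.endswith ('*' :: q) ['.'] = PySem.Chars.endswith q ['.'] := by
      cases q using List.reverseRecOn with
      | nil => decide
      | append_singleton xs x =>
        rw [show '*' :: (xs ++ [x]) = ('*' :: xs) ++ [x] by simp,
          pv_endswith_dot, pv_endswith_dot]
    rw [h]
    simp

-- main bridge: the one-pass transform after a nonempty prefix equals B's split/rejoin
lemma pv_sub_split (cs : List Char) (p : List Char) (hp : p ≠ []) :
    p ++ pvSubGo [p.getLast hp] cs = pvBJ ((List.splitOn '*' cs).modifyHead (p ++ ·)) := by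
  induction cs generalizing p with
  | nil => simp [List.splitOn, pvSubGo, pvBJ_single]
  | cons c rest ih =>
    rw [pv_splitOn_cons]
    by_cases hc : c = '*'
    · subst hc
      rw [if_pos rfl, List.modifyHead_cons]
      cases hsp : List.splitOn '*' rest with
      | nil => exact absurd hsp (pv_splitOn_ne_nil rest)
      | cons q rs =>
        rw [pvBJ_cons_cons, pvSubGo]
        have hmain := ih (p := ['*']) (by simp)
        simp only [List.getLast_singleton, hsp, List.modifyHead_cons] at hmain
        rw [show ['*'] ++ (q : List Char) = '*' :: q by simp, pv_bj_star] at hmain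
        have htail : pvSubGo ['*'] rest = pvBJ (q :: rs) := by
          have h3 : '*' :: pvSubGo ['*'] rest = '*' :: pvBJ (q :: rs) := by simpa using hmain
          injection h3
        rw [htail]
        have hend : PySem.Chars.endswith p ['.'] = decide (p.getLast hp = '.') := by
          obtain ⟨p', l, rfl⟩ : ∃ p' l, p = p' ++ [l] := by
            rcases List.eq_nil_or_concat p with h | ⟨p', l, h⟩
            · exact absurd h hp
            · exact ⟨p', l, by simpa using h⟩
          rw [pv_endswith_dot]
          simp
        by_cases hl : p.getLast hp = '.'
        · simp [hend, hl]
        · simp [hend, hl, Ne]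
    · rw [if_neg hc]
      have hmain := ih (p := p ++ [c]) (by simp)
      have hl : (p ++ [c]).getLast (by simp) = c := by simp
      rw [hl] at hmain
      cases hsp : List.splitOn '*' rest with
      | nil => exact absurd hsp (pv_splitOn_ne_nil rest)
      | cons q rs =>
        rw [hsp, List.modifyHead_cons] at hmain
        rw [List.modifyHead_cons, List.modifyHead_cons]
        rw [pvSubGo, if_neg (by simp [hc])]
        rw [show p ++ (c :: q : List Char) = (p ++ [c]) ++ q by simp]
        rw [← hmain]
        simp

-- ===== VERDICT (by name: the statement is the Claim_ definition above) =====
theorem validate_url_pattern_spec : Claim_equal_validate_url_pattern := by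
  intro value _
  unfold Spec_validate_url_pattern validate_url_pattern validate_url_pattern_alt
  cases value with
  | none => rfl
  | some v =>
    simp only []
    rw [pv_join_nil_flatten]
    congr 1
    congr 1
    rw [pv_anchor_eq v.toList]
    obtain ⟨t, ht⟩ := pv_anchor_head v.toList
    rw [ht]
    -- left side: A's comprehension = pvSubGo
    rw [PySem.List.enumerate_cons, List.map_cons, List.flatten_cons, if_neg (by simp)]
    have hA := pv_trans_eq ('^' :: t) ['^'] t (by simp) (by simp)
    simp only [List.length_singleton, Nat.cast_one, List.getLast_singleton] at hA
    rw [show ((0:Int) + 1) = (1:Int) by norm_num, hA]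
    -- right side: B's pieces = pvBJ of the split
    rw [pv_splitOn_cons, if_neg (by decide)]
    cases hsp : List.splitOn '*' t with
    | nil => exact absurd hsp (pv_splitOn_ne_nil t)
    | cons q rs =>
      simp only [List.modifyHead_cons]
      rw [pv_pieces_eq_bj]
      have hB := pv_sub_split t ['^'] (by simp)
      simp only [List.getLast_singleton, hsp, List.modifyHead_cons] at hB
      simpa using hB
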